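-- pv_equiv track=rewrite | github.com/Dongguk-sync/2025-capstone-sync-AI | langchain/split_size_test.py | split_by_title
-- ===== SOURCE A (Python) =====
-- def split_by_title(text):
--     chunks = []
--     current_chunk = ""
--     lines = text.strip().splitlines()
--
--     for line in lines:
--         if line.startswith("## ") and current_chunk:  # 새로운 제목을 만나면 청크 분리
--             chunks.append(current_chunk.strip())
--             current_chunk = line
--         else:
--             current_chunk += "\n" + line
--
--     if current_chunk:  # 마지막 청크 추가
--         chunks.append(current_chunk.strip())
--
--     return chunks
-- ===== SOURCE B (Python) =====
-- def _groups(lines):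
--     groups = []
--     i = 0
--     n = len(lines)
--     while i < n:
--         j = i + 1
--         while j < n and not lines[j].startswith("## "):
--             j += 1
--         groups.append(lines[i:j])
--         i = j
--     return groups
--
--
-- def split_by_title(text):
--     lines = text.strip().splitlines()
--     return ["\n".join(g).strip() for g in _groups(lines)]
-- ===== Notes on version B (the rewrite author's own statement) =====
-- stated objective: alternative
-- what changed: A builds each chunk by repeated string concatenation with an in-loop flush and a trailing flush; B first groups the lines into segments by scanning for title-line boundary indices and slicing, then maps join+strip over the segments.
import Mathlib
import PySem

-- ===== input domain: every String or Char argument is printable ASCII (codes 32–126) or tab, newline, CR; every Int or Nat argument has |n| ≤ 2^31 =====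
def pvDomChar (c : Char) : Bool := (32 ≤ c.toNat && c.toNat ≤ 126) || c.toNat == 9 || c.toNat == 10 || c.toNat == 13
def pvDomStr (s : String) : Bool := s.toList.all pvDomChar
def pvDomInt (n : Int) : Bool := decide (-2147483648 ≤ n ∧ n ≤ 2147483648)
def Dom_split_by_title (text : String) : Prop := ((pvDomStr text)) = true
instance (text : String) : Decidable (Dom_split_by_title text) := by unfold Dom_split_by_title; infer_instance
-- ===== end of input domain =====

-- B replaces A's single accumulating pass (string concatenation with in-loop flushes) by a
-- two-phase decomposition: group the lines into segments by scanning for title-line boundaries and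
-- slicing, then map join+strip over the segments ('alternative'; same asymptotic cost).

-- ===== PORT A =====
-- loop body of A's `for line in lines`, state = (chunks, current_chunk)
def pvStepA (st : List String × String) (line : String) : List String × String :=
  if PySem.Str.startswith line "## " = true ∧ st.2 ≠ "" then
    (st.1 ++ [PySem.Str.strip st.2], line)
  else
    (st.1, st.2 ++ "\n" ++ line)

def split_by_title (text : String) : List String :=
  let lines := PySem.Str.splitlines (PySem.Str.strip text)
  let st := lines.foldl pvStepA ([], "")
  if st.2 ≠ "" then st.1 ++ [PySem.Str.strip st.2] else st.1

-- ===== PORT B =====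
-- inner `while j < n and not lines[j].startswith("## "): j += 1` of Source B's _groups
-- (lines.getD j "" is exact here: the loop only reads lines[j] after checking j < n)
def pvFindBound (lines : List String) (j : Nat) : Nat :=
  if h : j < lines.length ∧ ¬ (PySem.Str.startswith (lines.getD j "") "## " = true) then
    pvFindBound lines (j + 1)
  else j
termination_by lines.length - j
decreasing_by omega

-- cited by pvGroupsB's decreasing_by (the outer while advances i to j > i)
theorem pvFindBound_ge (lines : List String) (j : Nat) : j ≤ pvFindBound lines j := by
  fun_induction pvFindBound lines j with
  | case1 j h ih => omega
  | case2 j h => omega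

-- outer `while i < n` of Source B's _groups, state reduced to i (groups is the returned list)
def pvGroupsB (lines : List String) (i : Nat) : List (List String) :=
  if h : i < lines.length then
    PySem.List.slice lines (some (i : Int)) (some ((pvFindBound lines (i + 1) : Nat) : Int))
      :: pvGroupsB lines (pvFindBound lines (i + 1))
  else []
termination_by lines.length - i
decreasing_by have := pvFindBound_ge lines (i + 1); omega

def split_by_title_alt (text : String) : List String :=
  (pvGroupsB (PySem.Str.splitlines (PySem.Str.strip text)) 0).map
    (fun g => PySem.Str.strip (PySem.Str.join "\n" g))

-- ===== PRECONDITION & SPEC =====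
def Spec_split_by_title (text : String) (out : List String) : Prop := out = split_by_title_alt text
instance (text : String) (out : List String) : Decidable (Spec_split_by_title text out) := by unfold Spec_split_by_title; infer_instance

-- ===== CLAIM (what is proved, stated in full; the proofs are below) =====
def Claim_equal_split_by_title : Prop := ∀ (text : String), Dom_split_by_title text → Spec_split_by_title text (split_by_title text)

-- ===== LEMMAS AND PROOFS =====

-- proof-side vocabulary
def pvP (s : String) : Bool := !(PySem.Str.startswith s "## ")

def pvF (g : List String) : String := PySem.Str.strip (PySem.Str.join "\n" g)

def pvJ (c : String) (seg : List String) : String :=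
  seg.foldl (fun a b => a ++ "\n" ++ b) c

-- span-based functional description of the grouping
def pvGroupsS : List String → List (List String)
  | [] => []
  | l :: rest =>
      (l :: rest.takeWhile pvP) :: pvGroupsS (rest.dropWhile pvP)
termination_by l => l.length
decreasing_by
  have := (List.dropWhile_sublist (p := pvP) (l := rest)).length_le
  simp; omega

theorem pvGroupsS_nil : pvGroupsS [] = [] := by rw [pvGroupsS]

theorem pvGroupsS_cons (l : String) (rest : List String) :
    pvGroupsS (l :: rest) = (l :: rest.takeWhile pvP) :: pvGroupsS (rest.dropWhile pvP) := by
  rw [pvGroupsS]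

-- functional description of A's remaining loop once current_chunk is nonempty
def pvAux : String → List String → List String
  | cur, [] => [PySem.Str.strip cur]
  | cur, l :: ls =>
      if PySem.Str.startswith l "## " = true then
        PySem.Str.strip cur :: pvAux l ls
      else
        pvAux (cur ++ "\n" ++ l) ls

theorem pvStrExt {s t : String} (h : s.toList = t.toList) : s = t :=
  String.ext (by simpa [String.toList] using h)

theorem pv_sw_ne_empty {l : String} (h : PySem.Str.startswith l "## " = true) : l ≠ "" := by
  intro hl; subst hl
  rw [PySem.Str.startswith_eq, PySem.Chars.startswith_iff] at h
  simp at h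

theorem pv_app_ne_empty (a b : String) : a ++ "\n" ++ b ≠ "" := by
  intro h
  have := congrArg String.toList h
  simp at this

theorem pv_strip_newline (s : String) : PySem.Str.strip ("\n" ++ s) = PySem.Str.strip s := by
  apply pvStrExt
  simp [PySem.Str.toList_strip, PySem.Chars.strip, PySem.Chars.lstrip,
    List.dropWhile_cons_of_pos (p := PySem.Chars.isspace)
      (by decide : PySem.Chars.isspace '\n' = true)]

theorem pvJ_pre (seg : List String) : ∀ a b : String, pvJ (a ++ b) seg = a ++ pvJ b seg := by
  induction seg with
  | nil => intro a b; rfl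
  | cons x seg ih =>
      intro a b
      show pvJ ((a ++ b) ++ "\n" ++ x) seg = a ++ pvJ ((b ++ "\n") ++ x) seg
      have h1 : (a ++ b) ++ "\n" ++ x = a ++ ((b ++ "\n") ++ x) := by
        rw [String.append_assoc, String.append_assoc, String.append_assoc]
      rw [h1, ih]

theorem pv_join_eq_pvJ (seg : List String) : ∀ l : String, PySem.Str.join "\n" (l :: seg) = pvJ l seg := by
  induction seg with
  | nil =>
      intro l
      apply pvStrExt
      simp [PySem.Str.toList_join, PySem.Chars.join_singleton, pvJ]
  | cons x seg ih =>
      intro l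
      have h1 : pvJ l (x :: seg) = (l ++ "\n") ++ pvJ x seg := by
        show pvJ ((l ++ "\n") ++ x) seg = (l ++ "\n") ++ pvJ x seg
        exact pvJ_pre seg (l ++ "\n") x
      apply pvStrExt
      rw [h1]
      have h2 := congrArg String.toList (ih x)
      simp only [PySem.Str.toList_join, List.map_cons] at h2 ⊢
      rw [PySem.Chars.join_cons_cons, h2]
      simp

theorem pv_foldA_eq (ls : List String) : ∀ (chunks : List String) (cur : String), cur ≠ "" →
    (if (ls.foldl pvStepA (chunks, cur)).2 ≠ "" then
        (ls.foldl pvStepA (chunks, cur)).1 ++ [PySem.Str.strip (ls.foldl pvStepA (chunks, cur)).2]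
      else (ls.foldl pvStepA (chunks, cur)).1)
      = chunks ++ pvAux cur ls := by
  induction ls with
  | nil =>
      intro chunks cur h
      simp [pvAux, h]
  | cons l ls ih =>
      intro chunks cur h
      by_cases hsw : PySem.Str.startswith l "## " = true
      · have hsw' : PySem.Chars.startswith l.toList ['#', '#', ' '] = true := by
          simpa using hsw
        have hstep : pvStepA (chunks, cur) l = (chunks ++ [PySem.Str.strip cur], l) := by
          simp [pvStepA, hsw', h]
        simp only [List.foldl_cons, hstep]
        rw [ih (chunks ++ [PySem.Str.strip cur]) l (pv_sw_ne_empty hsw)]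
        simp [pvAux, hsw']
      · have hsw' : PySem.Chars.startswith l.toList ['#', '#', ' '] = false := by
          simpa using hsw
        have hstep : pvStepA (chunks, cur) l = (chunks, cur ++ "\n" ++ l) := by
          simp [pvStepA, hsw']
        simp only [List.foldl_cons, hstep]
        rw [ih chunks (cur ++ "\n" ++ l) (pv_app_ne_empty cur l)]
        simp [pvAux, hsw']

theorem pv_aux_eq (ls : List String) : ∀ cur : String,
    pvAux cur ls
      = PySem.Str.strip (pvJ cur (ls.takeWhile pvP)) :: (pvGroupsS (ls.dropWhile pvP)).map pvF := by
  induction ls with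
  | nil => intro cur; simp [pvAux, pvGroupsS, pvJ]
  | cons l ls ih =>
      intro cur
      by_cases hsw : PySem.Str.startswith l "## " = true
      · have hsw' : PySem.Chars.startswith l.toList ['#', '#', ' '] = true := by
          simpa using hsw
        have hp : pvP l = false := by simp [pvP, hsw']
        rw [List.takeWhile_cons_of_neg (by simp [hp]), List.dropWhile_cons_of_neg (by simp [hp])]
        simp only [pvAux, if_pos hsw]
        rw [ih l, pvGroupsS_cons]
        have hF : pvF (l :: ls.takeWhile pvP) = PySem.Str.strip (pvJ l (ls.takeWhile pvP)) := by
          simp [pvF, pv_join_eq_pvJ]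
        simp [hF, pvJ]
      · have hsw' : PySem.Chars.startswith l.toList ['#', '#', ' '] = false := by
          simpa using hsw
        have hp : pvP l = true := by simp [pvP, hsw']
        rw [List.takeWhile_cons_of_pos (by simp [hp]), List.dropWhile_cons_of_pos (by simp [hp])]
        simp only [pvAux, if_neg hsw]
        rw [ih (cur ++ "\n" ++ l)]
        rfl

theorem pv_findBound_eq (lines : List String) (j : Nat) (hj : j ≤ lines.length) :
    pvFindBound lines j = j + ((lines.drop j).takeWhile pvP).length := by
  fun_induction pvFindBound lines j with
  | case1 j h ih =>
      obtain ⟨hlt, hns⟩ := h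
      rw [List.drop_eq_getElem_cons hlt]
      have hget : lines.getD j "" = lines[j] := by
        simp [List.getD_eq_getElem?_getD, List.getElem?_eq_getElem hlt]
      have hp : pvP lines[j] = true := by
        simp [pvP]; rw [← hget]; simpa using hns
      rw [List.takeWhile_cons_of_pos hp]
      rw [ih (by omega)]
      simp; omega
  | case2 j h =>
      rcases Nat.lt_or_ge j lines.length with hlt | hge
      · have hns : PySem.Str.startswith (lines.getD j "") "## " = true := by
          by_contra hc; exact h ⟨hlt, hc⟩
        rw [List.drop_eq_getElem_cons hlt]
        have hget : lines.getD j "" = lines[j] := by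
          simp [List.getD_eq_getElem?_getD, List.getElem?_eq_getElem hlt]
        have hp : pvP lines[j] = false := by
          simp [pvP]; rw [← hget]; simpa using hns
        rw [List.takeWhile_cons_of_neg (by simp [hp])]
        simp
      · have : lines.drop j = [] := List.drop_eq_nil_of_le hge
        simp [this]

theorem pv_groupsB_eq (lines : List String) (i : Nat) (hi : i ≤ lines.length) :
    pvGroupsB lines i = pvGroupsS (lines.drop i) := by
  fun_induction pvGroupsB lines i with
  | case1 i h ih =>
      set t := (lines.drop (i + 1)).takeWhile pvP with ht
      have hfb : pvFindBound lines (i + 1) = (i + 1) + t.length :=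
        pv_findBound_eq lines (i + 1) (by omega)
      have htle : t.length ≤ (lines.drop (i + 1)).length :=
        (List.takeWhile_prefix (l := lines.drop (i + 1)) pvP).length_le
      have hdl : (lines.drop (i + 1)).length = lines.length - (i + 1) := by simp
      -- the slice lines[i:j] is lines[i] :: t
      have hslice :
          PySem.List.slice lines (some (i : Int)) (some ((pvFindBound lines (i + 1) : Nat) : Int))
            = lines[i] :: t := by
        rw [PySem.List.slice_natCast, hfb]
        rw [List.drop_eq_getElem_cons h]
        have : (i + 1) + t.length - i = t.length + 1 := by omega
        rw [this, List.take_succ_cons]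
        congr 1
        have := (List.prefix_iff_eq_take).mp (List.takeWhile_prefix (l := lines.drop (i + 1)) pvP)
        exact this.symm
      -- the tail resumes at the dropWhile point
      have hdrop : lines.drop (pvFindBound lines (i + 1)) = (lines.drop (i + 1)).dropWhile pvP := by
        rw [hfb, ← List.drop_drop]
        conv_lhs => rw [← List.takeWhile_append_dropWhile (p := pvP) (l := lines.drop (i + 1))]
        rw [← ht, List.drop_left]
      rw [hslice, ih (by omega), hdrop]
      rw [List.drop_eq_getElem_cons h, pvGroupsS_cons]
  | case2 i h =>
      have : lines.drop i = [] := List.drop_eq_nil_of_le (by omega)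
      simp [this, pvGroupsS_nil]

-- ===== VERDICT (by name: the statement is the Claim_ definition above) =====
theorem split_by_title_spec : Claim_equal_split_by_title := by
  intro text _
  unfold Spec_split_by_title split_by_title split_by_title_alt
  cases hls : PySem.Str.splitlines (PySem.Str.strip text) with
  | nil =>
      simp [pvGroupsB]
  | cons l0 ls =>
      -- first iteration of A's loop: current_chunk = "" forces the else branch
      have hstep0 : pvStepA ([], "") l0 = ([], "\n" ++ l0) := by
        simp [pvStepA]
      simp only [List.foldl_cons, hstep0]
      have hne : ("\n" ++ l0 : String) ≠ "" := by
        intro hc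
        have := congrArg String.toList hc
        simp at this
      rw [pv_foldA_eq ls [] ("\n" ++ l0) hne]
      rw [pv_aux_eq ls ("\n" ++ l0)]
      have hJ : pvJ ("\n" ++ l0) (ls.takeWhile pvP) = "\n" ++ pvJ l0 (ls.takeWhile pvP) :=
        pvJ_pre (ls.takeWhile pvP) "\n" l0
      rw [hJ, pv_strip_newline]
      rw [pv_groupsB_eq (l0 :: ls) 0 (by simp)]
      simp only [List.drop_zero]
      rw [pvGroupsS_cons]
      have hF : pvF (l0 :: ls.takeWhile pvP) = PySem.Str.strip (pvJ l0 (ls.takeWhile pvP)) := by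
        simp [pvF, pv_join_eq_pvJ]
      simp only [List.map_cons, ← hF]
      simp [pvF]
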